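-- pv_equiv track=rewrite | github.com/seonghyeon2471/ris_team_project | ksh/navigation.py | find_gaps
-- ===== SOURCE A (Python) =====
-- TWO_PATH_WIDTH_MIN  = 5      # gap이 최소 이 각도 이상이어야 유효 gap으로 인정 (°)
--
-- def find_gaps(proc_dists, safe_dist):
--     """
--     연속된 열린 공간(gap) 구간 리스트 반환.
--     반환: [(start_idx, end_idx), ...]
--     """
--     gaps      = []
--     gap_start = None
--
--     for i, d in enumerate(proc_dists):
--         if d > safe_dist:
--             if gap_start is None:
--                 gap_start = i
--         else:
--             if gap_start is not None:
--                 gaps.append((gap_start, i - 1))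
--                 gap_start = None
--
--     if gap_start is not None:
--         gaps.append((gap_start, len(proc_dists) - 1))
--
--     # 너무 좁은 gap 제거
--     gaps = [g for g in gaps if (g[1] - g[0]) >= TWO_PATH_WIDTH_MIN]
--     return gaps
-- ===== SOURCE B (Python) =====
-- TWO_PATH_WIDTH_MIN = 5
--
--
-- def find_gaps(proc_dists, safe_dist):
--     """Boundary-detection decomposition: build the openness mask, collect run
--     STARTS (open with closed/absent left neighbor) and run ENDS (open with
--     closed/absent right neighbor) as two index lists, pair them with zip,
--     and keep the sufficiently wide pairs."""
--     mask = [d > safe_dist for d in proc_dists]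
--     n = len(mask)
--     starts = [i for i in range(n) if mask[i] and (i == 0 or not mask[i - 1])]
--     ends = [i for i in range(n) if mask[i] and (i == n - 1 or not mask[i + 1])]
--     return [(s, e) for s, e in zip(starts, ends)
--             if e - s >= TWO_PATH_WIDTH_MIN]
-- ===== Notes on version B (the rewrite author's own statement) =====
-- stated objective: alternative
-- what changed: Replaced A's single-pass gap_start state machine (with a trailing-run special case) by staged boundary detection: an openness mask, two comprehensions collecting run-start and run-end indices by neighbor comparison, and a zip that pairs them before the width filter.
import Mathlib
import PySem

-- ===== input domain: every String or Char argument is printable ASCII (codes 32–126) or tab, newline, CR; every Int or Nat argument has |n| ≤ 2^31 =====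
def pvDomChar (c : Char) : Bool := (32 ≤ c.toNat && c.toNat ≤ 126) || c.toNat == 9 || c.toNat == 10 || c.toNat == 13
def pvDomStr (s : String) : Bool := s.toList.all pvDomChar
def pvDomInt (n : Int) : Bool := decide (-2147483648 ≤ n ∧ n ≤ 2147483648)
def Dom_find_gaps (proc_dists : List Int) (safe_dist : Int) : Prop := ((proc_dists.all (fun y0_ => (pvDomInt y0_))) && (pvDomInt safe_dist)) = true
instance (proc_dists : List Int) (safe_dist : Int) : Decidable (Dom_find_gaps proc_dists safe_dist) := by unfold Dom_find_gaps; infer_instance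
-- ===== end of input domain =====

-- B replaces A's gap_start state machine + trailing-run special case by staged boundary
-- detection (mask, run-start indices, run-end indices, zip) (objective: alternative; same O(n)).

-- ===== PORT A =====
-- the for-loop of A: state = (gaps accumulator, gap_start); i is the current index
def pvLoopA (safe : Int) : List Int → Int → Option Int → List (Int × Int) → (List (Int × Int) × Option Int)
  | [], _, gs, acc => (acc, gs)
  | d :: rest, i, gs, acc =>
    if safe < d then
      match gs with
      | none => pvLoopA safe rest (i + 1) (some i) acc
      | some g => pvLoopA safe rest (i + 1) (some g) acc
    else
      match gs with
      | some g => pvLoopA safe rest (i + 1) none (acc ++ [(g, i - 1)])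
      | none => pvLoopA safe rest (i + 1) none acc

def find_gaps (proc_dists : List Int) (safe_dist : Int) : List (Int × Int) :=
  let r := pvLoopA safe_dist proc_dists 0 none []
  let gaps := match r.2 with
    | some g => r.1 ++ [(g, (proc_dists.length : Int) - 1)]
    | none => r.1
  gaps.filter (fun g => decide (5 ≤ g.2 - g.1))

-- ===== PORT B =====
def find_gaps_alt (proc_dists : List Int) (safe_dist : Int) : List (Int × Int) :=
  let mask := proc_dists.map (fun d => decide (safe_dist < d))
  let n := mask.length
  let starts := (List.range n).filter (fun i => mask.getD i false && (i == 0 || !(mask.getD (i - 1) false)))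
  let ends := (List.range n).filter (fun i => mask.getD i false && (i == n - 1 || !(mask.getD (i + 1) false)))
  ((starts.zip ends).map (fun p => ((p.1 : Int), (p.2 : Int)))).filter (fun g => decide (5 ≤ g.2 - g.1))

-- ===== PRECONDITION & SPEC =====
def Spec_find_gaps (proc_dists : List Int) (safe_dist : Int) (out : List (Int × Int)) : Prop := out = find_gaps_alt proc_dists safe_dist
instance (proc_dists : List Int) (safe_dist : Int) (out : List (Int × Int)) : Decidable (Spec_find_gaps proc_dists safe_dist out) := by unfold Spec_find_gaps; infer_instance

-- ===== CLAIM (what is proved, stated in full; the proofs are below) =====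
def Claim_equal_find_gaps : Prop := ∀ (proc_dists : List Int) (safe_dist : Int), Dom_find_gaps proc_dists safe_dist → Spec_find_gaps proc_dists safe_dist (find_gaps proc_dists safe_dist)

-- ===== LEMMAS AND PROOFS =====

def pvPred (g : Int × Int) : Bool := decide (5 ≤ g.2 - g.1)

-- proof-level run-splitting intermediate (links A's state machine to B's boundary lists)
def pvRunSplit (safe : Int) (o : Bool) : List Int → Nat × List Int
  | [] => (0, [])
  | d :: rest =>
    if decide (safe < d) = o then
      let p := pvRunSplit safe o rest
      (p.1 + 1, p.2)
    else (0, d :: rest)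

theorem pvRunSplit_len (safe : Int) (o : Bool) (l : List Int) :
    (pvRunSplit safe o l).2.length ≤ l.length := by
  induction l with
  | nil => simp [pvRunSplit]
  | cons d rest ih =>
    simp only [pvRunSplit]
    split
    · exact le_trans ih (by simp)
    · simp

def pvScanB (safe : Int) : List Int → Int → List (Int × Int)
  | [], _ => []
  | d :: rest, i =>
    let o := decide (safe < d)
    let p := pvRunSplit safe o rest
    let j := i + 1 + (p.1 : Int)
    if o && decide (5 ≤ (j - 1) - i) then
      (i, j - 1) :: pvScanB safe p.2 j
    else pvScanB safe p.2 j
termination_by l _ => l.length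
decreasing_by all_goals
  exact Nat.lt_succ_of_le (pvRunSplit_len safe (decide (safe < d)) rest)

-- A's value on the suffix l starting at index i with pending gap_start gs (loop + trailing close)
def pvAfterA (safe : Int) (l : List Int) (i : Int) (gs : Option Int) : List (Int × Int) :=
  (pvLoopA safe l i gs []).1 ++
    (match (pvLoopA safe l i gs []).2 with
     | some g => [(g, i + (l.length : Int) - 1)]
     | none => [])

-- pvScanB's value when a gap is pending: close it at the end of the leading open run
def pvContB (safe : Int) (g i : Int) (l : List Int) : List (Int × Int) :=
  let p := pvRunSplit safe true l
  (if pvPred (g, i + (p.1 : Int) - 1) then [(g, i + (p.1 : Int) - 1)] else []) ++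
    pvScanB safe p.2 (i + (p.1 : Int))

theorem pvLoopA_acc (safe : Int) (l : List Int) :
    ∀ (i : Int) (gs : Option Int) (acc : List (Int × Int)),
      pvLoopA safe l i gs acc = (acc ++ (pvLoopA safe l i gs []).1, (pvLoopA safe l i gs []).2) := by
  induction l with
  | nil => intro i gs acc; simp [pvLoopA]
  | cons d rest ih =>
    intro i gs acc
    cases gs with
    | none =>
      by_cases hd : safe < d
      · simp only [pvLoopA, if_pos hd]; rw [ih]
      · simp only [pvLoopA, if_neg hd]; rw [ih]
    | some g =>
      by_cases hd : safe < d
      · simp only [pvLoopA, if_pos hd]; rw [ih]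
      · simp only [pvLoopA, if_neg hd]
        rw [ih _ _ (acc ++ [(g, i - 1)]), ih _ _ ([] ++ [(g, i - 1)])]
        simp

theorem pvScanB_false (safe d : Int) (rest : List Int) (i : Int) (hd : ¬ safe < d) :
    pvScanB safe (d :: rest) i = pvScanB safe rest (i + 1) := by
  rw [pvScanB]
  simp only [decide_eq_false hd, Bool.false_and, Bool.false_eq_true, if_false]
  cases rest with
  | nil => simp [pvRunSplit, pvScanB]
  | cons e rest' =>
    by_cases he : safe < e
    · simp [pvRunSplit, decide_eq_true he]
    · conv_rhs => rw [pvScanB]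
      simp only [decide_eq_false he, Bool.false_and, Bool.false_eq_true, if_false, pvRunSplit]
      congr 1
      push_cast
      ring

theorem pvScanB_cons_true (safe d : Int) (rest : List Int) (i : Int) (hd : safe < d) :
    pvScanB safe (d :: rest) i = pvContB safe i (i + 1) rest := by
  rw [pvScanB, pvContB]
  simp only [decide_eq_true hd, Bool.true_and, pvPred]
  split_ifs <;> simp_all

theorem pvContB_cons_true (safe g d : Int) (rest : List Int) (i : Int) (hd : safe < d) :
    pvContB safe g i (d :: rest) = pvContB safe g (i + 1) rest := by
  rw [pvContB, pvContB]
  simp only [pvRunSplit, decide_eq_true hd, ite_true]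
  rw [show i + (((pvRunSplit safe true rest).1 + 1 : Nat) : Int)
      = i + 1 + ((pvRunSplit safe true rest).1 : Int) by push_cast; ring]

theorem pvMain (safe : Int) (l : List Int) :
    (∀ i : Int, (pvAfterA safe l i none).filter pvPred = pvScanB safe l i) ∧
    (∀ (g i : Int), (pvAfterA safe l i (some g)).filter pvPred = pvContB safe g i l) := by
  induction l with
  | nil =>
    constructor
    · intro i; simp [pvAfterA, pvLoopA, pvScanB]
    · intro g i
      simp only [pvAfterA, pvLoopA, pvContB, pvRunSplit, pvScanB, List.nil_append,
        List.filter_cons, List.filter_nil, List.length_nil, Nat.cast_zero, add_zero]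
      split_ifs <;> simp
  | cons d rest ih =>
    have hlen : ∀ i : Int, i + ((d :: rest).length : Int) - 1 = (i + 1) + (rest.length : Int) - 1 := by
      intro i; simp only [List.length_cons]; push_cast; ring
    by_cases hd : safe < d
    · constructor
      · intro i
        have h1 : pvAfterA safe (d :: rest) i none = pvAfterA safe rest (i + 1) (some i) := by
          simp only [pvAfterA, pvLoopA, if_pos hd, hlen]
        rw [h1, ih.2 i (i + 1), pvScanB_cons_true safe d rest i hd]
      · intro g i
        have h1 : pvAfterA safe (d :: rest) i (some g) = pvAfterA safe rest (i + 1) (some g) := by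
          simp only [pvAfterA, pvLoopA, if_pos hd, hlen]
        rw [h1, ih.2 g (i + 1), pvContB_cons_true safe g d rest i hd]
    · constructor
      · intro i
        have h1 : pvAfterA safe (d :: rest) i none = pvAfterA safe rest (i + 1) none := by
          simp only [pvAfterA, pvLoopA, if_neg hd, hlen]
        rw [h1, ih.1 (i + 1), pvScanB_false safe d rest i hd]
      · intro g i
        have h1 : pvAfterA safe (d :: rest) i (some g)
            = (g, i - 1) :: pvAfterA safe rest (i + 1) none := by
          simp only [pvAfterA, pvLoopA, if_neg hd, hlen]
          rw [pvLoopA_acc safe rest (i + 1) none ([] ++ [(g, i - 1)])]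
          simp
        rw [h1, List.filter_cons, ih.1 (i + 1)]
        rw [pvContB]
        simp only [pvRunSplit, decide_eq_false hd, Bool.false_eq_true, if_false,
          Nat.cast_zero, add_zero]
        rw [← pvScanB_false safe d rest i hd]
        split_ifs <;> simp

-- ===== B-side: recursive characterization of the boundary-index lists =====

-- run-start indices of a mask, given the openness of the preceding element
def pvS (prev : Bool) : List Bool → List Nat
  | [] => []
  | b :: m => (if b && !prev then [0] else []) ++ (pvS b m).map (· + 1)

-- run-end indices of a mask
def pvE : List Bool → List Nat
  | [] => []
  | b :: m => (if b && !(m.headD false) then [0] else []) ++ (pvE m).map (· + 1)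

def pvMsk (safe : Int) (l : List Int) : List Bool := l.map (fun d => decide (safe < d))

def pvCi (i : Int) (k : Nat) : Int := i + (k : Int)

-- pending-run end list: pending run closes at i-1 iff the suffix does not continue it
def pvEp (m : List Bool) (i : Int) : List Int :=
  (if m.headD false then [] else [i - 1]) ++ (pvE m).map (pvCi i)

theorem pvMap_shift (f : List Nat) (i : Int) :
    ((f.map (· + 1)).map (pvCi i)) = f.map (pvCi (i + 1)) := by
  rw [List.map_map]
  apply List.map_congr_left
  intro a _
  simp [pvCi, Function.comp]
  ring

theorem pvZipMain (safe : Int) (l : List Int) :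
    (∀ i : Int,
      ((((pvS false (pvMsk safe l)).map (pvCi i)).zip ((pvE (pvMsk safe l)).map (pvCi i))).filter pvPred
        = pvScanB safe l i)) ∧
    (∀ (g i : Int),
      (((g :: (pvS true (pvMsk safe l)).map (pvCi i)).zip (pvEp (pvMsk safe l) i)).filter pvPred
        = pvContB safe g i l)) := by
  induction l with
  | nil =>
    constructor
    · intro i; simp [pvMsk, pvS, pvE, pvScanB]
    · intro g i
      simp only [pvMsk, List.map_nil, pvS, pvE, pvEp, List.headD_nil, Bool.false_eq_true,
        if_false, pvContB, pvRunSplit, Nat.cast_zero, add_zero, pvScanB]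
      split_ifs <;> simp_all
  | cons d rest ih =>
    by_cases hd : safe < d
    · have hm : pvMsk safe (d :: rest) = true :: pvMsk safe rest := by
        simp [pvMsk, decide_eq_true hd]
      constructor
      · intro i
        rw [hm]
        simp only [pvS, pvE, Bool.and_self, Bool.not_false, if_true,
          List.map_append, List.singleton_append, List.map_cons]
        rw [pvMap_shift, pvMap_shift]
        have hci : pvCi i 0 = i := by simp [pvCi]
        rw [hci]
        have hEp : List.map (pvCi i) (if (true && !((pvMsk safe rest).headD false)) = true then [0] else [])
              ++ (pvE (pvMsk safe rest)).map (pvCi (i + 1)) = pvEp (pvMsk safe rest) (i + 1) := by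
          simp only [pvEp, Bool.true_and]
          cases h : (pvMsk safe rest).headD false <;> simp [pvCi, h]
        rw [hEp, ih.2 i (i + 1), pvScanB_cons_true safe d rest i hd]
      · intro g i
        rw [hm]
        simp only [pvS, Bool.not_true, Bool.and_false, Bool.false_eq_true, if_false,
          List.nil_append]
        rw [pvMap_shift]
        have hEp : pvEp (true :: pvMsk safe rest) i = pvEp (pvMsk safe rest) (i + 1) := by
          simp only [pvEp, List.headD_cons, if_true, List.nil_append, pvE,
            List.map_append]
          rw [pvMap_shift]
          cases h : (pvMsk safe rest).headD false <;> simp [pvCi, h]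
        rw [hEp, ih.2 g (i + 1), pvContB_cons_true safe g d rest i hd]
    · have hm : pvMsk safe (d :: rest) = false :: pvMsk safe rest := by
        simp [pvMsk, decide_eq_false hd]
      constructor
      · intro i
        rw [hm]
        simp only [pvS, pvE, Bool.false_and, Bool.false_eq_true, if_false, List.nil_append]
        rw [pvMap_shift, pvMap_shift, ih.1 (i + 1), pvScanB_false safe d rest i hd]
      · intro g i
        rw [hm]
        simp only [pvS, pvE, pvEp, Bool.false_and, Bool.false_eq_true, if_false,
          List.nil_append, List.headD_cons, List.map_append, List.singleton_append]
        rw [pvMap_shift, pvMap_shift, List.zip_cons_cons, List.filter_cons, ih.1 (i + 1)]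
        rw [pvContB]
        have hrs : pvRunSplit safe true (d :: rest) = (0, d :: rest) := by
          simp [pvRunSplit, decide_eq_false hd]
        rw [hrs]
        simp only [Nat.cast_zero, add_zero]
        rw [← pvScanB_false safe d rest i hd]
        split_ifs <;> simp

-- bridge: the range-filter comprehensions of the port equal pvS / pvE
theorem pvS_bridge (m : List Bool) :
    (List.range m.length).filter (fun i => m.getD i false && (i == 0 || !(m.getD (i - 1) false)))
      = pvS false m := by
  have gen : ∀ (m : List Bool) (prev : Bool),
      (List.range m.length).filter
        (fun i => m.getD i false && !(if i = 0 then prev else m.getD (i - 1) false))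
        = pvS prev m := by
    intro m
    induction m with
    | nil => intro prev; simp [pvS]
    | cons b m ih =>
      intro prev
      rw [List.length_cons, List.range_succ_eq_map, List.filter_cons, List.filter_map]
      have hcomp : ((fun i => (b :: m).getD i false
            && !(if i = 0 then prev else (b :: m).getD (i - 1) false)) ∘ Nat.succ)
          = (fun i => m.getD i false && !(if i = 0 then b else m.getD (i - 1) false)) := by
        funext i
        simp only [Function.comp]
        cases i with
        | zero => simp
        | succ j => simp
      rw [hcomp, ih b, pvS]
      cases b <;> cases prev <;> simp
  have pt : (fun i => m.getD i false && (i == 0 || !(m.getD (i - 1) false)))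
      = (fun i => m.getD i false && !(if i = 0 then false else m.getD (i - 1) false)) := by
    funext i
    cases i with
    | zero => simp
    | succ j => simp
  rw [pt, gen m false]

theorem pvE_bridge (m : List Bool) :
    (List.range m.length).filter
        (fun i => m.getD i false && (i == m.length - 1 || !(m.getD (i + 1) false)))
      = pvE m := by
  have gen : ∀ m : List Bool,
      (List.range m.length).filter (fun i => m.getD i false && !(m.getD (i + 1) false)) = pvE m := by
    intro m
    induction m with
    | nil => simp [pvE]
    | cons b m ih =>
      rw [List.length_cons, List.range_succ_eq_map, List.filter_cons, List.filter_map]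
      have hcomp : ((fun i => (b :: m).getD i false && !((b :: m).getD (i + 1) false)) ∘ Nat.succ)
          = (fun i => m.getD i false && !(m.getD (i + 1) false)) := by
        funext i; simp [Function.comp]
      rw [hcomp, ih, pvE]
      cases b <;> cases hh : m.headD false <;>
        (cases m with
         | nil => simp_all
         | cons c m' => simp_all [List.getD])
  have pt : List.filter
        (fun i => m.getD i false && (i == m.length - 1 || !(m.getD (i + 1) false)))
        (List.range m.length)
      = List.filter (fun i => m.getD i false && !(m.getD (i + 1) false)) (List.range m.length) := by
    apply List.filter_congr
    intro i hi
    rw [List.mem_range] at hi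
    by_cases h : i = m.length - 1
    · subst h
      have h2 : m.getD (m.length - 1 + 1) false = false := List.getD_eq_default _ _ (by omega)
      simp only [List.getD] at h2
      simp [h2]
    · have hb : (i == m.length - 1) = false := by simp [h]
      simp [hb]
  rw [pt, gen]

-- zip of casted index lists = casted zip
theorem pvZipCast (s e : List Nat) :
    ((s.map (pvCi 0)).zip (e.map (pvCi 0)))
      = (s.zip e).map (fun p => ((p.1 : Int), (p.2 : Int))) := by
  rw [List.zip_map]
  apply List.map_congr_left
  intro a _
  simp [pvCi, Prod.map]

-- ===== VERDICT (by name: the statement is the Claim_ definition above) =====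
theorem find_gaps_spec : Claim_equal_find_gaps := by
  intro proc_dists safe_dist _
  unfold Spec_find_gaps
  have hB := (pvZipMain safe_dist proc_dists).1 0
  rw [pvZipCast, ← pvS_bridge (pvMsk safe_dist proc_dists),
      ← pvE_bridge (pvMsk safe_dist proc_dists)] at hB
  simp only [pvMsk] at hB
  have hAlt : find_gaps_alt proc_dists safe_dist = pvScanB safe_dist proc_dists 0 := by
    unfold find_gaps_alt
    exact hB
  rw [hAlt]
  have hA := (pvMain safe_dist proc_dists).1 0
  simp only [pvAfterA, zero_add] at hA
  rw [← hA]
  have hfg : find_gaps proc_dists safe_dist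
      = (match (pvLoopA safe_dist proc_dists 0 none []).2 with
         | some g => (pvLoopA safe_dist proc_dists 0 none []).1 ++ [(g, (proc_dists.length : Int) - 1)]
         | none => (pvLoopA safe_dist proc_dists 0 none []).1).filter pvPred := rfl
  rw [hfg]
  cases hr : (pvLoopA safe_dist proc_dists 0 none []).2 with
  | none => simp
  | some g => simp
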